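-- pv_equiv track=rewrite | github.com/UUDigitalHumanitieslab/sasta | backend/sastadev/counterfunctions.py | counter2list
-- ===== SOURCE A (Python) =====
-- def checkinteger(thestr):
--     try:
--         cast = int(thestr)
--         result = True
--     except ValueError:
--         result = False
--     return result
--
-- def counter2list(thecounter):
--     resultlist = []
--     allintegers = True
--     for el in thecounter:
--         if allintegers:
--             allintegers = allintegers and checkinteger(el)
--         cnt = thecounter[el]
--         for i in range(cnt):
--             resultlist.append(str(el))
--     if allintegers:
--         sortedresultlist = sorted(resultlist, key=int)
--     else:
--         sortedresultlist = sorted(resultlist)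
--     return sortedresultlist
-- ===== SOURCE B (Python) =====
-- def checkinteger(thestr):
--     try:
--         int(thestr)
--         return True
--     except ValueError:
--         return False
--
-- def counter2list(thecounter):
--     keys = list(thecounter)
--     if all(checkinteger(k) for k in keys):
--         keys.sort(key=int)
--     else:
--         keys.sort()
--     result = []
--     for k in keys:
--         result.extend([str(k)] * thecounter[k])
--     return result
-- ===== Notes on version B (the rewrite author's own statement) =====
-- stated objective: alternative
-- what changed: Instead of expanding every key count-many times and then stably sorting the whole repeated list, B sorts only the key list (by int value or lexicographically) and then expands each key count-many times in sorted order.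
import Mathlib
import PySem

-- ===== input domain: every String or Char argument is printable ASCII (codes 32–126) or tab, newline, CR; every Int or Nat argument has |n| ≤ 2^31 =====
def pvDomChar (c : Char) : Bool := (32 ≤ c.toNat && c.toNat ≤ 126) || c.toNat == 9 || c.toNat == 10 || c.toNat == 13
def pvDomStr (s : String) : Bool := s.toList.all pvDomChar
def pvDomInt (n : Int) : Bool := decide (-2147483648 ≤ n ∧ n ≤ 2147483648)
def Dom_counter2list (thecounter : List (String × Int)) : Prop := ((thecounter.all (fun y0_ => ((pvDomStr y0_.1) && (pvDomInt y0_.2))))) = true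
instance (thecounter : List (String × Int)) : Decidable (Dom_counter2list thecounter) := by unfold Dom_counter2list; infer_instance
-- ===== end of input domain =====

-- B sorts only the keys and then expands each key count-many times in sorted order,
-- instead of A's expand-every-key-first-then-sort-the-repetitions; return values are proved identical.

-- ===== PORT A =====
-- checkinteger(thestr): int(thestr) succeeds ↔ PySem.Int.ofStr? returns some
def checkintegerA (thestr : String) : Bool := (PySem.Int.ofStr? thestr).isSome

-- sorted(resultlist, key=int): every element passed checkinteger when this branch runs,
-- so '(ofStr? s).getD 0' is exactly int(s) there.
def counter2list (thecounter : List (String × Int)) : List String :=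
  let st := thecounter.foldl (fun (acc : List String × Bool) el =>
    let allintegers := if acc.2 then acc.2 && checkintegerA el.1 else acc.2
    let cnt := PySem.Dict.getD ⟨thecounter⟩ el.1 0   -- thecounter[el]; el is a key, so no KeyError
    let resultlist := (PySem.List.pyRange 0 cnt 1).foldl (fun r _ => r ++ [el.1]) acc.1  -- str(el) = el
    (resultlist, allintegers)) ([], true)
  if st.2 then PySem.List.sorted st.1 (fun s => (PySem.Int.ofStr? s).getD 0)
  else PySem.List.sorted st.1 (fun s => s)

-- ===== PORT B =====
def checkintegerB (thestr : String) : Bool := (PySem.Int.ofStr? thestr).isSome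

def counter2list_alt (thecounter : List (String × Int)) : List String :=
  let keys := thecounter.map (fun p => p.1)          -- list(thecounter)
  let sortedkeys :=
    if keys.all (fun k => checkintegerB k)
    then PySem.List.sorted keys (fun s => (PySem.Int.ofStr? s).getD 0)  -- keys.sort(key=int); exact here
    else PySem.List.sorted keys (fun s => s)                            -- keys.sort()
  sortedkeys.foldl (fun result k =>
    result ++ PySem.List.pyRepeat [k] (PySem.Dict.getD ⟨thecounter⟩ k 0)) []  -- result.extend([str(k)] * thecounter[k])

-- ===== PRECONDITION & SPEC =====
def Spec_counter2list (thecounter : List (String × Int)) (out : List String) : Prop := out = counter2list_alt thecounter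
instance (thecounter : List (String × Int)) (out : List String) : Decidable (Spec_counter2list thecounter out) := by unfold Spec_counter2list; infer_instance

-- ===== CLAIM (what is proved, stated in full; the proofs are below) =====
def Claim_equal_counter2list : Prop := ∀ (thecounter : List (String × Int)), Dom_counter2list thecounter → Spec_counter2list thecounter (counter2list thecounter)

-- ===== LEMMAS AND PROOFS =====

-- the per-key block of repeated strings
def pvRep (tc : List (String × Int)) (k : String) : List String :=
  List.replicate (PySem.Dict.getD ⟨tc⟩ k 0).toNat k

-- a list that starts all-true and continues all-false splits exactly at the boundary
lemma takeWhile_dropWhile_split {α : Type} (p : α → Bool) (A B : List α)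
    (hA : ∀ a ∈ A, p a = true) (hB : ∀ b ∈ B, p b = false) :
    (A ++ B).takeWhile p = A ∧ (A ++ B).dropWhile p = B := by
  induction A with
  | nil =>
    cases B with
    | nil => simp
    | cons b B =>
      simp [hB b (by simp)]
  | cons a A ih =>
    have ha : p a = true := hA a (by simp)
    have := ih (fun a ha' => hA a (by simp [ha']))
    simp [ha, this.1, this.2]

-- insertBy is a takeWhile/dropWhile split
lemma insertBy_eq_takeWhile_dropWhile {α : Type} (bef : α → α → Bool) (x : α) (L : List α) :
    PySem.List.insertBy bef x L =
      L.takeWhile (fun y => !(bef x y)) ++ x :: L.dropWhile (fun y => !(bef x y)) := by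
  induction L with
  | nil => rfl
  | cons y L ih =>
    by_cases h : bef x y
    · simp [PySem.List.insertBy, h]
    · simp [PySem.List.insertBy, h, ih]

-- every element the dropWhile keeps is strictly above the inserted key
lemma key_lt_of_mem_dropWhile {K : Type} [LinearOrder K] {α : Type} (key : α → K) (x : α)
    (ps : List α) (hps : ps.Pairwise (fun a b => key a ≤ key b)) :
    ∀ q ∈ ps.dropWhile (fun y => !(decide (key x < key y))), key x < key q := by
  induction ps with
  | nil => simp
  | cons p ps ih =>
    rcases List.pairwise_cons.mp hps with ⟨hp, htl⟩
    by_cases h : key x < key p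
    · intro q hq
      rw [List.dropWhile_cons] at hq
      simp [h] at hq
      rcases hq with rfl | hq
      · exact h
      · exact lt_of_lt_of_le h (hp q hq)
    · intro q hq
      rw [List.dropWhile_cons] at hq
      simp [h] at hq
      exact ih htl q hq

-- inserting a run of equal-key elements one by one lands them, in order, at the split point
lemma foldl_insertBy_block {K : Type} [LinearOrder K] (key : String → K) (k : String)
    (bs T1 T2 : List String)
    (h1 : ∀ y ∈ T1, key y ≤ key k) (h2 : ∀ y ∈ T2, key k < key y)
    (hb : ∀ x ∈ bs, key x = key k) :
    bs.foldl (fun acc x => PySem.List.insertBy (fun a b => decide (key a < key b)) x acc) (T1 ++ T2)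
      = T1 ++ bs ++ T2 := by
  induction bs generalizing T1 with
  | nil => simp
  | cons x bs ih =>
    have hx : key x = key k := hb x (by simp)
    have hins : PySem.List.insertBy (fun a b => decide (key a < key b)) x (T1 ++ T2)
        = (T1 ++ [x]) ++ T2 := by
      rw [insertBy_eq_takeWhile_dropWhile]
      have hsplit := takeWhile_dropWhile_split (fun y => !(decide (key x < key y))) T1 T2
        (fun y hy => by simp [not_lt.mpr (hx ▸ h1 y hy : key y ≤ key x)])
        (fun y hy => by simp [hx ▸ h2 y hy])
      rw [hsplit.1, hsplit.2]; simp
    rw [List.foldl_cons, hins, ih (T1 ++ [x])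
      (by intro y hy; rcases List.mem_append.mp hy with hy | hy
          · exact h1 y hy
          · simp at hy; subst hy; exact le_of_eq hx)
      (fun x hxx => hb x (by simp [hxx]))]
    simp

-- one insertion step commutes with block expansion
lemma insertBy_flatMap {K : Type} [LinearOrder K] (key : String → K) (rep : String → List String)
    (hrep : ∀ q x, x ∈ rep q → key x = key q) (k : String) (ps : List String)
    (hps : ps.Pairwise (fun a b => key a ≤ key b)) :
    (rep k).foldl (fun acc x => PySem.List.insertBy (fun a b => decide (key a < key b)) x acc)
        (ps.flatMap rep)
      = (PySem.List.insertBy (fun a b => decide (key a < key b)) k ps).flatMap rep := by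
  rw [insertBy_eq_takeWhile_dropWhile]
  have hsplit : ps.takeWhile (fun y => !(decide (key k < key y))) ++
      ps.dropWhile (fun y => !(decide (key k < key y))) = ps := List.takeWhile_append_dropWhile
  have hfm : ps.flatMap rep
      = (ps.takeWhile (fun y => !(decide (key k < key y)))).flatMap rep
        ++ (ps.dropWhile (fun y => !(decide (key k < key y)))).flatMap rep := by
    conv_lhs => rw [← hsplit]
    rw [List.flatMap_append]
  rw [hfm, foldl_insertBy_block key k (rep k) _ _
    (by intro y hy
        rcases List.mem_flatMap.mp hy with ⟨q, hq, hyq⟩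
        have hple := List.mem_takeWhile_imp hq
        simp only [Bool.not_eq_true', decide_eq_false_iff_not, not_lt] at hple
        exact (hrep q y hyq) ▸ hple)
    (by intro y hy
        rcases List.mem_flatMap.mp hy with ⟨q, hq, hyq⟩
        exact (hrep q y hyq) ▸ key_lt_of_mem_dropWhile key k ps hps q hq)
    (hrep k)]
  simp [List.flatMap_append]

-- insertBy keeps the accumulator weakly sorted
lemma pairwise_insertBy {K : Type} [LinearOrder K] {α : Type} (key : α → K) (k : α) (ps : List α)
    (hps : ps.Pairwise (fun a b => key a ≤ key b)) :
    (PySem.List.insertBy (fun a b => decide (key a < key b)) k ps).Pairwise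
      (fun a b => key a ≤ key b) := by
  rw [insertBy_eq_takeWhile_dropWhile]
  have hP1 : ∀ a ∈ ps.takeWhile (fun y => !(decide (key k < key y))), key a ≤ key k := by
    intro a ha
    have := List.mem_takeWhile_imp ha
    simpa only [Bool.not_eq_true', decide_eq_false_iff_not, not_lt] using this
  have hP2 := key_lt_of_mem_dropWhile key k ps hps
  rw [List.pairwise_append]
  refine ⟨hps.sublist (List.takeWhile_sublist _), ?_, ?_⟩
  · rw [List.pairwise_cons]
    exact ⟨fun q hq => le_of_lt (hP2 q hq), hps.sublist (List.dropWhile_sublist _)⟩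
  · intro a ha b hb
    rcases List.mem_cons.mp hb with rfl | hb
    · exact hP1 a ha
    · exact le_trans (hP1 a ha) (le_of_lt (hP2 b hb))

-- THE CORE: a stable sort of the expanded list is the expansion of the stably sorted key list
lemma sorted_flatMap {K : Type} [LinearOrder K] (key : String → K) (rep : String → List String)
    (hrep : ∀ q x, x ∈ rep q → key x = key q) (ks : List String) :
    PySem.List.sorted (ks.flatMap rep) key = (PySem.List.sorted ks key).flatMap rep := by
  rw [PySem.List.sorted_eq_foldl_insertBy, PySem.List.sorted_eq_foldl_insertBy]
  suffices h : ∀ (ks ps : List String), ps.Pairwise (fun a b => key a ≤ key b) →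
      (ks.flatMap rep).foldl
          (fun acc x => PySem.List.insertBy (fun a b => decide (key a < key b)) x acc)
          (ps.flatMap rep)
        = (ks.foldl (fun acc x => PySem.List.insertBy (fun a b => decide (key a < key b)) x acc)
            ps).flatMap rep by
    simpa using h ks [] (by simp)
  intro ks
  induction ks with
  | nil => intro ps _; rfl
  | cons k ks ih =>
    intro ps hps
    rw [List.flatMap_cons, List.foldl_append, insertBy_flatMap key rep hrep k ps hps,
        ih _ (pairwise_insertBy key k ps hps), List.foldl_cons]

-- A's loop, unrolled: result list and the all-integers flag
lemma A_fold (tc : List (String × Int)) (l : List (String × Int)) (r : List String) (b : Bool) :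
    l.foldl (fun (acc : List String × Bool) el =>
      let allintegers := if acc.2 then acc.2 && checkintegerA el.1 else acc.2
      let cnt := PySem.Dict.getD ⟨tc⟩ el.1 0
      let resultlist := (PySem.List.pyRange 0 cnt 1).foldl (fun r _ => r ++ [el.1]) acc.1
      (resultlist, allintegers)) (r, b)
    = (r ++ (l.map (fun p => p.1)).flatMap (pvRep tc), b && l.all (fun p => checkintegerA p.1)) := by
  induction l generalizing r b with
  | nil => simp
  | cons el l ih =>
    rw [List.foldl_cons, ih]
    have hblk : (PySem.List.pyRange 0 (PySem.Dict.getD ⟨tc⟩ el.1 0) 1).foldl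
        (fun r _ => r ++ [el.1]) r = r ++ pvRep tc el.1 := by
      rw [PySem.List.foldl_append_singleton_eq_map]
      have : (PySem.List.pyRange 0 (PySem.Dict.getD ⟨tc⟩ el.1 0) 1).map (fun _ => el.1)
          = List.replicate (PySem.Dict.getD ⟨tc⟩ el.1 0).toNat el.1 := by
        rw [List.map_const']
        simp [PySem.List.length_pyRange_one]
      rw [this]; rfl
    have hflag : (if b then b && checkintegerA el.1 else b) = (b && checkintegerA el.1) := by
      cases b <;> rfl
    simp only [hflag, hblk]
    simp [Bool.and_assoc, List.flatMap_cons, List.append_assoc]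

-- ===== VERDICT (by name: the statement is the Claim_ definition above) =====
theorem counter2list_spec : Claim_equal_counter2list := by
  intro tc _
  unfold Spec_counter2list counter2list counter2list_alt
  simp only [A_fold tc tc [] true]
  have hall : tc.all (fun p => checkintegerA p.1)
      = (tc.map (fun p => p.1)).all (fun k => checkintegerB k) := by
    simp [List.all_map, checkintegerA, checkintegerB, Function.comp_def]
  have hB : ∀ ks : List String,
      ks.foldl (fun result k =>
        result ++ PySem.List.pyRepeat [k] (PySem.Dict.getD ⟨tc⟩ k 0)) []
      = ks.flatMap (pvRep tc) := by
    intro ks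
    have : ∀ k, PySem.List.pyRepeat [k] (PySem.Dict.getD ⟨tc⟩ k 0) = pvRep tc k := by
      intro k; rw [PySem.List.pyRepeat_singleton]; rfl
    simp only [this]
    simpa using PySem.List.foldl_append_eq_flatMap (pvRep tc) ks []
  rw [hB, ← hall]
  by_cases hai : tc.all (fun p => checkintegerA p.1)
  · simp only [hai, if_true]
    exact sorted_flatMap _ (pvRep tc)
      (fun q x hx => by rw [List.eq_of_mem_replicate hx]) _
  · simp only [Bool.not_eq_true] at hai
    simp only [hai, if_false, Bool.false_eq_true]
    exact sorted_flatMap _ (pvRep tc)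
      (fun q x hx => by rw [List.eq_of_mem_replicate hx]) _
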